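-- pv_equiv track=rewrite | github.com/sqanatoliy/codewars_py | 6kyu_block_pusher.py | block_pushing
-- ===== SOURCE A (Python) =====
-- def block_pushing(lst, n):
--     pusher = ">"
--     space = "-"
--
--     for move in range(n):
--         pusher_indexes = [index for index, value in enumerate(lst) if value == pusher]
--         for pusher_index in pusher_indexes:
--             try:
--                 space_pos = pusher_index + lst[pusher_index:].index(space)
--
--                 next_pusher = any(
--                     index > pusher_index and index < space_pos
--                     for index in pusher_indexes
--                 )
--                 if next_pusher:
--                     next_pushers = [
--                         index
--                         for index, value in enumerate(lst[pusher_index + 1 : space_pos])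
--                         if value == pusher
--                     ]
--                     for i in next_pushers:
--                         pusher_indexes.remove(pusher_index + 1 + i)
--                 lst.pop(space_pos)
--                 lst.insert(pusher_index, space)
--             except ValueError:
--                 pass
--
--     return lst
-- ===== SOURCE B (Python) =====
-- def block_pushing(lst, n):
--     for _ in range(n):
--         out = []
--         i = 0
--         while i < len(lst):
--             if lst[i] == ">":
--                 j = i
--                 while j < len(lst) and lst[j] != "-":
--                     j += 1
--                 if j < len(lst):
--                     out.append("-")
--                     out.extend(lst[i:j])
--                     i = j + 1
--                 else:
--                     out.extend(lst[i:])
--                     i = len(lst)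
--             else:
--                 out.append(lst[i])
--                 i += 1
--         lst[:] = out
--     return lst
-- ===== Notes on version B (the rewrite author's own statement) =====
-- stated objective: simpler
-- what changed: A precomputes the pusher-index list every move and mutates the list with index bookkeeping (.index on a slice, any(), .remove of overtaken indexes, pop/insert); B rebuilds the list in one left-to-right scan per move, shifting each maximal '>'-run with a following '-' right by one.
import Mathlib
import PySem

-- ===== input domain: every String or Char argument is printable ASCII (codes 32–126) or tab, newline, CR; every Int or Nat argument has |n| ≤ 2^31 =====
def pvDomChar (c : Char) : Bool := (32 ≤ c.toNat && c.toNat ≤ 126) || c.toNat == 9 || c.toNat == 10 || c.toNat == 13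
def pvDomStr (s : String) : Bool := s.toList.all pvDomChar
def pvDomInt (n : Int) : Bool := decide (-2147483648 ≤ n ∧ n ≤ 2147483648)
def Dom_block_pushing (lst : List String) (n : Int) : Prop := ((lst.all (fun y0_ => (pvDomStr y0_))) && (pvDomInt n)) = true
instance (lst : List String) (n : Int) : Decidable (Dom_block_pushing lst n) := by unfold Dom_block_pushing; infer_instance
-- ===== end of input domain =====

-- B replaces A's per-move index bookkeeping (pusher-position list, `.index`, `.remove`, pop/insert)
-- with one left-to-right scan per move that rebuilds the list; equivalence is about the RETURN value
-- (both Pythons also mutate `lst` in place to the same final contents and return the same object).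

-- ===== PORT A =====
-- `[index for index, value in enumerate(lst) if value == pusher]` (start index s)
def pvPusherAux (xs : List String) (s : Int) : List Int :=
  (PySem.List.enumerate xs s).filterMap (fun p => if p.2 = ">" then some p.1 else none)

-- the inner `for pusher_index in pusher_indexes:` loop of one move.  Python iterates by cursor
-- while `.remove` deletes only strictly later (larger) elements, so the iteration is exactly a
-- recursion on the remaining sublist; the already-passed indexes (all < pusher_index) can never
-- satisfy `index > pusher_index`, so `any(...)` over `pi :: rest` is the Python `any`.
-- The fuel argument only makes the recursion structural; it never runs out (fuel ≥ idxs.length).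
def pvInnerA : Nat → List String → List Int → List String
  | _, lst, [] => lst
  | 0, lst, _ :: _ => lst     -- unreachable: fuel ≥ number of remaining indexes throughout
  | f + 1, lst, pi :: rest =>
    match PySem.List.index? (PySem.List.slice lst (some pi) none) "-" with
    | none => pvInnerA f lst rest               -- except ValueError: pass
    | some k =>
      let space_pos : Int := pi + (k : Int)
      let next_pusher : Bool :=
        (pi :: rest).any (fun idx => decide (pi < idx) && decide (idx < space_pos))
      let rest' : List Int :=
        if next_pusher then
          -- `for i in next_pushers: pusher_indexes.remove(pusher_index + 1 + i)`
          -- (`remove` cannot raise here: each value is present; `.getD acc` is unreachable)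
          (pvPusherAux (PySem.List.slice lst (some (pi + 1)) (some space_pos)) 0).foldl
            (fun acc i => (PySem.List.remove? acc (pi + 1 + i)).getD acc) rest
        else rest
      let lst' : List String :=
        match PySem.List.pop? lst space_pos with
        | none => lst                           -- unreachable: space_pos is a valid index
        | some r => PySem.List.insert r.2 pi "-"
      pvInnerA f lst' rest'

def pvMoveA (lst : List String) : List String :=
  pvInnerA (pvPusherAux lst 0).length lst (pvPusherAux lst 0)

def pvGoA : Nat → List String → List String
  | 0, lst => lst
  | m + 1, lst => pvGoA m (pvMoveA lst)

def block_pushing (lst : List String) (n : Int) : List String := pvGoA n.toNat lst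

-- ===== PORT B =====
-- one move of Source B: a single left-to-right scan; at a '>' the inner `while j` scan is the
-- takeWhile/dropWhile split.  Fuel = list length, only a totality guard (it never runs out).
def pvStepBF : Nat → List String → List String
  | _, [] => []
  | 0, xs => xs               -- unreachable: fuel ≥ length throughout
  | f + 1, x :: xs =>
    if x = ">" then
      let seg := (x :: xs).takeWhile (fun y => y ≠ "-")
      match (x :: xs).dropWhile (fun y => y ≠ "-") with
      | [] => x :: xs
      | _ :: tail => "-" :: (seg ++ pvStepBF f tail)
    else x :: pvStepBF f xs

def pvStepB (xs : List String) : List String := pvStepBF xs.length xs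

def pvGoB : Nat → List String → List String
  | 0, lst => lst
  | m + 1, lst => pvGoB m (pvStepB lst)

def block_pushing_alt (lst : List String) (n : Int) : List String := pvGoB n.toNat lst

-- ===== PRECONDITION & SPEC =====
def Spec_block_pushing (lst : List String) (n : Int) (out : List String) : Prop := out = block_pushing_alt lst n
instance (lst : List String) (n : Int) (out : List String) : Decidable (Spec_block_pushing lst n out) := by unfold Spec_block_pushing; infer_instance

-- ===== CLAIM (what is proved, stated in full; the proofs are below) =====
def Claim_equal_block_pushing : Prop := ∀ (lst : List String) (n : Int), Dom_block_pushing lst n → Spec_block_pushing lst n (block_pushing lst n)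

-- ===== LEMMAS AND PROOFS =====

-- pvPusherAux structure
lemma pvPusherAux_nil (s : Int) : pvPusherAux [] s = [] := rfl

lemma pvPusherAux_cons (x : String) (xs : List String) (s : Int) :
    pvPusherAux (x :: xs) s = (if x = ">" then [s] else []) ++ pvPusherAux xs (s + 1) := by
  simp only [pvPusherAux, PySem.List.enumerate_cons, List.filterMap_cons]
  by_cases h : x = ">" <;> simp [h]

lemma pvPusherAux_append (xs ys : List String) (s : Int) :
    pvPusherAux (xs ++ ys) s = pvPusherAux xs s ++ pvPusherAux ys (s + xs.length) := by
  simp [pvPusherAux, PySem.List.enumerate_append, List.filterMap_append]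

lemma pvPusherAux_eq_nil_iff (xs : List String) (s : Int) :
    pvPusherAux xs s = [] ↔ ">" ∉ xs := by
  induction xs generalizing s with
  | nil => simp [pvPusherAux_nil]
  | cons x xs ih =>
    rw [pvPusherAux_cons]
    by_cases h : x = ">"
    · simp [h]
    · simp only [h, if_false, List.nil_append, ih, List.mem_cons]
      constructor
      · rintro hn (hc | hc)
        · exact h hc.symm
        · exact hn hc
      · intro hn; exact fun hc => hn (Or.inr hc)

lemma pvPusherAux_bounds {xs : List String} {s v : Int} (h : v ∈ pvPusherAux xs s) :
    s ≤ v ∧ v < s + xs.length := by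
  induction xs generalizing s with
  | nil => simp [pvPusherAux_nil] at h
  | cons x xs ih =>
    rw [pvPusherAux_cons] at h
    rcases List.mem_append.mp h with h1 | h2
    · by_cases hx : x = ">" <;> simp [hx] at h1
      subst h1
      refine ⟨le_rfl, ?_⟩
      simp only [List.length_cons]
      push_cast; omega
    · have := ih h2
      simp only [List.length_cons]
      push_cast at this ⊢; omega

lemma pvPusherAux_shift (xs : List String) (s t : Int) :
    pvPusherAux xs (s + t) = (pvPusherAux xs t).map (fun v => s + v) := by
  induction xs generalizing t with
  | nil => simp [pvPusherAux_nil]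
  | cons x xs ih =>
    rw [pvPusherAux_cons, pvPusherAux_cons]
    have harg : s + t + 1 = s + (t + 1) := by ring
    rw [harg, ih]
    by_cases h : x = ">" <;> simp [h]

-- removing exactly the freshly-listed values from the front group
lemma pvRemoveAll (vs : List Int) (g : Int → Int) (l2 : List Int) :
    vs.foldl (fun acc i => (PySem.List.remove? acc (g i)).getD acc) (vs.map g ++ l2) = l2 := by
  induction vs generalizing l2 with
  | nil => rfl
  | cons v vt ih =>
    simp only [List.map_cons, List.cons_append, List.foldl_cons, PySem.List.remove?_cons_self,
      Option.getD_some]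
    exact ih l2

-- a pusher position at or beyond `pre` with no "-" in `suf` gets ValueError
lemma pvNoDash (pre suf : List String) (v : Int) (hv : (pre.length : Int) ≤ v) (hs : "-" ∉ suf) :
    PySem.List.index? (PySem.List.slice (pre ++ suf) (some v) none) "-" = none := by
  have h0 : (0:Int) ≤ v := le_trans (by positivity) hv
  rw [PySem.List.slice_from _ h0]
  rw [PySem.List.index?_eq_none_iff]
  intro hmem
  have hge : pre.length ≤ v.toNat := by omega
  rw [show v.toNat = pre.length + (v.toNat - pre.length) by omega, ← List.drop_drop,
    List.drop_left] at hmem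
  exact hs (List.drop_subset _ _ hmem)

lemma pvInnerA_noSpace : ∀ (f : Nat) (lst : List String) (idxs : List Int),
    idxs.length ≤ f →
    (∀ v ∈ idxs, PySem.List.index? (PySem.List.slice lst (some v) none) "-" = none) →
    pvInnerA f lst idxs = lst := by
  intro f
  induction f with
  | zero =>
    intro lst idxs hlen _
    have : idxs = [] := List.eq_nil_of_length_eq_zero (Nat.le_zero.mp hlen)
    subst this; rfl
  | succ f ih =>
    intro lst idxs hlen hall
    cases idxs with
    | nil => rfl
    | cons pi rest =>
      simp only [pvInnerA]
      rw [hall pi (by simp)]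
      exact ih lst rest (by simp at hlen; omega) (fun v hv => hall v (by simp [hv]))

-- pvStepB unfolding lemmas
lemma pvStepBF_irrel : ∀ (f g : Nat) (xs : List String), xs.length ≤ f → xs.length ≤ g →
    pvStepBF f xs = pvStepBF g xs := by
  intro f
  induction f with
  | zero =>
    intro g xs hf _
    have : xs = [] := List.eq_nil_of_length_eq_zero (Nat.le_zero.mp hf)
    subst this; cases g <;> rfl
  | succ f ih =>
    intro g xs hf hg
    cases xs with
    | nil => cases g <;> rfl
    | cons x t =>
      cases g with
      | zero => simp at hg
      | succ g =>
        simp only [pvStepBF]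
        by_cases hx : x = ">"
        · subst hx
          simp only [if_true]
          simp only [List.length_cons] at hf hg
          cases hd : List.dropWhile (fun y => decide (y ≠ "-")) (">" :: t) with
          | nil => rfl
          | cons y tail =>
            have h1 := List.length_dropWhile_le (fun y => decide (y ≠ "-")) (">" :: t)
            rw [hd] at h1
            simp only [List.length_cons] at h1
            dsimp only
            rw [ih g tail (by omega) (by omega)]
        · simp only [hx, if_false]
          simp only [List.length_cons] at hf hg
          rw [ih g t (by omega) (by omega)]

lemma pvStepB_cons_ne {x : String} (t : List String) (h : ¬ x = ">") :
    pvStepB (x :: t) = x :: pvStepB t := by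
  simp [pvStepB, pvStepBF, h]

lemma pvStepB_skip (r1 z : List String) (h : ∀ a ∈ r1, ¬ a = ">") :
    pvStepB (r1 ++ z) = r1 ++ pvStepB z := by
  induction r1 with
  | nil => simp
  | cons a t ih =>
    rw [List.cons_append, pvStepB_cons_ne _ (h a (by simp)),
      ih (fun b hb => h b (by simp [hb])), List.cons_append]

lemma pvStepB_noDash (s : List String) (h : "-" ∉ s) : pvStepB (">" :: s) = ">" :: s := by
  have hd : List.dropWhile (fun y => decide (y ≠ "-")) (">" :: s) = [] := by
    rw [List.dropWhile_eq_nil_iff]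
    intro a ha
    simp only [ne_eq, decide_eq_true_eq]
    rintro rfl
    rcases List.mem_cons.mp ha with hc | hc
    · exact absurd hc.symm (by decide)
    · exact h hc
  simp only [pvStepB, pvStepBF, List.length_cons, if_true]
  rw [hd]

lemma pvStepB_block (s1 s2 : List String) (h : "-" ∉ s1) :
    pvStepB (">" :: (s1 ++ "-" :: s2)) = "-" :: (">" :: s1) ++ pvStepB s2 := by
  have hall : ∀ a ∈ (">" :: s1), (fun y => decide (y ≠ "-")) a = true := by
    intro a ha
    simp only [ne_eq, decide_eq_true_eq]
    rintro rfl
    rcases List.mem_cons.mp ha with hc | hc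
    · exact absurd hc.symm (by decide)
    · exact h hc
  have hd : List.dropWhile (fun y => decide (y ≠ "-")) (">" :: (s1 ++ "-" :: s2)) = "-" :: s2 := by
    rw [show (">" :: (s1 ++ "-" :: s2)) = (">" :: s1) ++ "-" :: s2 by simp,
      List.dropWhile_append_of_pos hall]
    simp
  have ht : List.takeWhile (fun y => decide (y ≠ "-")) (">" :: (s1 ++ "-" :: s2)) = ">" :: s1 := by
    rw [show (">" :: (s1 ++ "-" :: s2)) = (">" :: s1) ++ "-" :: s2 by simp,
      List.takeWhile_append_of_pos hall]
    simp
  simp only [pvStepB, pvStepBF, List.length_cons, if_true]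
  rw [hd, ht]
  dsimp only
  simp only [List.cons_append]
  congr 3
  apply pvStepBF_irrel
  · simp; omega
  · rfl

-- the main invariant: one inner loop of A, started on the untouched suffix `rest`,
-- produces exactly B's single scan of `rest`
-- general fact about eraseIdx at the length of the left part
lemma pvEraseIdxAppend {A : Type} (l1 : List A) (a : A) (l2 : List A) :
    (l1 ++ a :: l2).eraseIdx l1.length = l1 ++ l2 := by
  induction l1 with
  | nil => simp
  | cons x xs ih => simp [ih]

lemma pvINV : ∀ (f : Nat) (front rest : List String) (idxs : List Int),
    idxs.length ≤ f → idxs = pvPusherAux rest (front.length : Int) →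
    pvInnerA f (front ++ rest) idxs = front ++ pvStepB rest := by
  intro f
  induction f with
  | zero =>
    intro front rest idxs hlen hEq
    have hnil : idxs = [] := List.eq_nil_of_length_eq_zero (Nat.le_zero.mp hlen)
    have hmem : ">" ∉ rest := (pvPusherAux_eq_nil_iff rest _).mp (hnil ▸ hEq).symm
    have hr : ∀ a ∈ rest, ¬ a = ">" := fun a ha h => hmem (h ▸ ha)
    have hstep : pvStepB rest = rest := by
      have h1 := pvStepB_skip rest [] hr
      rw [List.append_nil] at h1
      rw [h1, show pvStepB ([]:List String) = [] from rfl, List.append_nil]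
    rw [hnil, hstep]
    rfl
  | succ f ih =>
    intro front rest idxs hlen hEq
    by_cases hmem : ">" ∈ rest
    case neg =>
      have hnil : idxs = [] := by
        rw [hEq]; exact (pvPusherAux_eq_nil_iff rest _).mpr hmem
      have hr : ∀ a ∈ rest, ¬ a = ">" := fun a ha h => hmem (h ▸ ha)
      have hstep : pvStepB rest = rest := by
        have h1 := pvStepB_skip rest [] hr
        rw [List.append_nil] at h1
        rw [h1, show pvStepB ([]:List String) = [] from rfl, List.append_nil]
      rw [hnil, hstep]
      rfl
    case pos =>
      -- split rest at its first ">"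
      obtain ⟨r1, r2, hsplit, hr1⟩ :
          ∃ r1 r2, rest = r1 ++ ">" :: r2 ∧ ∀ a ∈ r1, ¬ a = ">" := by
        cases hd : rest.dropWhile (fun y => y ≠ ">") with
        | nil =>
          exfalso
          have := List.dropWhile_eq_nil_iff.mp hd ">" hmem
          simp at this
        | cons x t =>
          have hx : x = ">" := by
            have h2 := List.head_dropWhile_not (l := rest) (p := fun y => y ≠ ">")
              (by rw [hd]; simp)
            simp only [hd, List.head_cons] at h2
            simpa using h2
          subst hx
          refine ⟨rest.takeWhile (fun y => y ≠ ">"), t, ?_, ?_⟩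
          · conv_lhs => rw [← List.takeWhile_append_dropWhile (p := fun y => y ≠ ">") (l := rest)]
            rw [hd]
          · intro a ha
            have := List.mem_takeWhile_imp ha
            simpa using this
      by_cases hm : "-" ∈ r2
      case neg =>
        have hidx : idxs = ((front.length : Int) + r1.length) ::
            pvPusherAux r2 ((front.length : Int) + r1.length + 1) := by
          rw [hEq, hsplit, pvPusherAux_append,
            (pvPusherAux_eq_nil_iff r1 _).mpr (fun hc => hr1 ">" hc rfl),
            pvPusherAux_cons]
          simp
        have hLform : (front ++ rest) = (front ++ r1) ++ (">" :: r2) := by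
          rw [hsplit]; simp
        have hnotmem : "-" ∉ (">" :: r2) := by
          intro hc
          rcases List.mem_cons.mp hc with h1 | h1
          · exact absurd h1 (by decide)
          · exact hm h1
        have hnone : PySem.List.index? (PySem.List.slice (front ++ rest)
            (some ((front.length : Int) + r1.length)) none) "-" = none := by
          rw [hLform]
          exact pvNoDash _ _ _ (by simp) hnotmem
        rw [hidx]
        simp only [pvInnerA]
        rw [hnone]
        have hres : pvInnerA f (front ++ rest)
            (pvPusherAux r2 ((front.length : Int) + r1.length + 1)) = front ++ rest := by
          apply pvInnerA_noSpace
          · have h2 := hlen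
            rw [hidx] at h2
            simp only [List.length_cons] at h2
            omega
          · intro v hv
            have hb := (pvPusherAux_bounds hv).1
            rw [hLform]
            exact pvNoDash _ _ _ (by simp at hb ⊢; omega) hnotmem
        rw [hres]
        rw [hsplit, pvStepB_skip r1 _ hr1, pvStepB_noDash r2 hm]
      case pos =>
        obtain ⟨s1, s2, hsplit2, hs1⟩ : ∃ s1 s2, r2 = s1 ++ "-" :: s2 ∧ "-" ∉ s1 := by
          cases hd : r2.dropWhile (fun y => y ≠ "-") with
          | nil =>
            exfalso
            have := List.dropWhile_eq_nil_iff.mp hd "-" hm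
            simp at this
          | cons x t =>
            have hx : x = "-" := by
              have h2 := List.head_dropWhile_not (l := r2) (p := fun y => y ≠ "-")
                (by rw [hd]; simp)
              simp only [hd, List.head_cons] at h2
              simpa using h2
            subst hx
            refine ⟨r2.takeWhile (fun y => y ≠ "-"), t, ?_, ?_⟩
            · conv_lhs => rw [← List.takeWhile_append_dropWhile (p := fun y => y ≠ "-") (l := r2)]
              rw [hd]
            · intro hc
              have := List.mem_takeWhile_imp hc
              simp at this
        have hidx : idxs = ((front.length : Int) + r1.length) ::
            (pvPusherAux s1 ((front.length : Int) + r1.length + 1) ++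
             pvPusherAux s2 ((front.length : Int) + r1.length + 1 + s1.length + 1)) := by
          rw [hEq, hsplit, hsplit2, pvPusherAux_append,
            (pvPusherAux_eq_nil_iff r1 _).mpr (fun hc => hr1 ">" hc rfl),
            pvPusherAux_cons, pvPusherAux_append, pvPusherAux_cons]
          simp
        have hLform : (front ++ rest) = (front ++ r1) ++ ">" :: (s1 ++ "-" :: s2) := by
          rw [hsplit, hsplit2]; simp
        have hslice : PySem.List.slice (front ++ rest)
            (some ((front.length : Int) + r1.length)) none = ">" :: (s1 ++ "-" :: s2) := by
          rw [hLform,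
            show ((front.length : Int) + r1.length) = (((front ++ r1).length : Nat) : Int) by simp,
            PySem.List.slice_from_natCast]
          exact List.drop_left
        have hindex : PySem.List.index? (">" :: (s1 ++ "-" :: s2)) "-" = some (s1.length + 1) := by
          rw [PySem.List.index?_eq_some_iff]
          refine ⟨">" :: s1, s2, by simp, by simp, ?_⟩
          intro hc
          rcases List.mem_cons.mp hc with h1 | h1
          · exact absurd h1 (by decide)
          · exact hs1 h1
        rw [hidx]
        simp only [pvInnerA]
        rw [hslice, hindex]
        dsimp only
        -- the popped/reinserted list: the block shifts one step right
        have hL2 : front ++ rest = (front ++ r1 ++ ">" :: s1) ++ "-" :: s2 := by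
          rw [hsplit, hsplit2]; simp
        have hpop : PySem.List.pop? (front ++ rest)
            ((front.length : Int) + r1.length + ((s1.length + 1 : Nat) : Int)) =
            some ("-", (front ++ r1 ++ ">" :: s1) ++ s2) := by
          rw [hL2, show ((front.length : Int) + r1.length + ((s1.length + 1 : Nat) : Int))
              = (((front ++ r1 ++ ">" :: s1).length : Nat) : Int) by
                simp only [List.length_append, List.length_cons]; push_cast; ring]
          rw [PySem.List.pop?_natCast (front ++ r1 ++ ">" :: s1 ++ "-" :: s2)
            (front ++ r1 ++ ">" :: s1).length (by simp)]
          congr 1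
          refine Prod.ext ?_ ?_
          · exact List.getElem_of_append rfl rfl
          · exact pvEraseIdxAppend _ _ _
        have hins : PySem.List.insert ((front ++ r1 ++ ">" :: s1) ++ s2)
            ((front.length : Int) + r1.length) "-" =
            (front ++ (r1 ++ "-" :: ">" :: s1)) ++ s2 := by
          rw [show (front ++ r1 ++ ">" :: s1) ++ s2 = (front ++ r1) ++ (">" :: (s1 ++ s2)) by simp,
            show ((front.length : Int) + r1.length) = (((front ++ r1).length : Nat) : Int) by
              simp only [List.length_append]; push_cast; ring,
            PySem.List.insert_natCast _ _ _ (by simp),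
            List.take_left, List.drop_left]
          simp
        -- the slice handed to the removal loop is exactly the inner segment s1
        have hslice2 : PySem.List.slice (front ++ rest)
            (some ((front.length : Int) + r1.length + 1))
            (some ((front.length : Int) + r1.length + ((s1.length + 1 : Nat) : Int))) = s1 := by
          rw [hLform,
            show ((front.length : Int) + r1.length + 1)
              = (((front.length + r1.length + 1 : Nat)) : Int) by push_cast; ring,
            show ((front.length : Int) + r1.length + ((s1.length + 1 : Nat) : Int))
              = (((front.length + r1.length + 1 : Nat)) : Int) + ((s1.length : Nat) : Int) by
                push_cast; ring,
            PySem.List.slice_natCast_add,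
            show front ++ r1 ++ ">" :: (s1 ++ "-" :: s2)
              = (front ++ r1 ++ [">"]) ++ (s1 ++ "-" :: s2) by simp,
            show front.length + r1.length + 1 = (front ++ r1 ++ [">"]).length by simp; omega,
            List.drop_left, List.take_left]
        -- shift of the inner pusher positions
        have hg1 : pvPusherAux s1 ((front.length : Int) + r1.length + 1) =
            (pvPusherAux s1 0).map (fun v => (front.length : Int) + r1.length + 1 + v) := by
          have := pvPusherAux_shift s1 ((front.length : Int) + r1.length + 1) 0
          rw [add_zero] at this
          exact this
        -- fuel for the recursive call
        have hfuel : (pvPusherAux s2 ((front.length : Int) + r1.length + 1 + s1.length + 1)).length ≤ f := by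
          have h2 := hlen
          rw [hidx] at h2
          simp only [List.length_cons, List.length_append] at h2
          omega
        -- the recursive call: A finishes the untouched suffix s2
        have harg : pvPusherAux s2 ((front.length : Int) + r1.length + 1 + s1.length + 1) =
            pvPusherAux s2 (((front ++ (r1 ++ "-" :: ">" :: s1)).length : Nat) : Int) := by
          congr 1
          simp
          ring
        have hrec := ih (front ++ (r1 ++ "-" :: ">" :: s1)) s2
          (pvPusherAux s2 ((front.length : Int) + r1.length + 1 + s1.length + 1)) hfuel harg
        -- the right-hand side: B's scan of rest
        have hrhs : pvStepB rest = r1 ++ ("-" :: (">" :: s1) ++ pvStepB s2) := by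
          rw [hsplit, hsplit2, pvStepB_skip r1 _ hr1, pvStepB_block s1 s2 hs1]
        -- now distinguish whether the block contains further pushers
        by_cases hg : ">" ∈ s1
        case pos =>
          have hne : pvPusherAux s1 ((front.length : Int) + r1.length + 1) ≠ [] := by
            intro hc
            exact ((pvPusherAux_eq_nil_iff _ _).mp hc) hg
          obtain ⟨v, hv⟩ := List.exists_mem_of_ne_nil _ hne
          have hb := pvPusherAux_bounds hv
          have hany : ((((front.length : Int) + r1.length) ::
              (pvPusherAux s1 ((front.length : Int) + r1.length + 1) ++
                pvPusherAux s2 ((front.length : Int) + r1.length + 1 + s1.length + 1))).any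
              fun idx => decide ((front.length : Int) + r1.length < idx) &&
                decide (idx < (front.length : Int) + r1.length + ((s1.length + 1 : Nat) : Int))) = true := by
            rw [List.any_eq_true]
            refine ⟨v, List.mem_cons_of_mem _ (List.mem_append_left _ hv), ?_⟩
            simp only [Bool.and_eq_true, decide_eq_true_eq]
            push_cast at hb ⊢
            omega
          rw [if_pos hany, hslice2, hg1, pvRemoveAll, hpop]
          dsimp only
          rw [hins, hrec, hrhs]
          simp
        case neg =>
          have hnil : pvPusherAux s1 ((front.length : Int) + r1.length + 1) = [] :=
            (pvPusherAux_eq_nil_iff _ _).mpr hg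
          have hany : ((((front.length : Int) + r1.length) ::
              (pvPusherAux s1 ((front.length : Int) + r1.length + 1) ++
                pvPusherAux s2 ((front.length : Int) + r1.length + 1 + s1.length + 1))).any
              fun idx => decide ((front.length : Int) + r1.length < idx) &&
                decide (idx < (front.length : Int) + r1.length + ((s1.length + 1 : Nat) : Int))) = false := by
            rw [List.any_eq_false]
            intro x hx
            rcases List.mem_cons.mp hx with hx | hx
            · subst hx; simp
            · rw [hnil, List.nil_append] at hx
              have hb := pvPusherAux_bounds hx
              simp only [Bool.and_eq_true, decide_eq_true_eq, not_and]
              intro _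
              push_cast at hb ⊢
              omega
          rw [if_neg (by rw [hany]; simp), hnil, List.nil_append, hpop]
          dsimp only
          rw [hins, hrec, hrhs]
          simp

lemma pvMoveA_eq_stepB (lst : List String) : pvMoveA lst = pvStepB lst := by
  have h := pvINV (pvPusherAux lst 0).length [] lst (pvPusherAux lst 0) le_rfl (by simp)
  simpa [pvMoveA] using h

lemma pvGo_eq : ∀ (m : Nat) (lst : List String), pvGoA m lst = pvGoB m lst := by
  intro m
  induction m with
  | zero => intro lst; rfl
  | succ m ih => intro lst; simp [pvGoA, pvGoB, pvMoveA_eq_stepB, ih]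

-- ===== VERDICT (by name: the statement is the Claim_ definition above) =====
theorem block_pushing_spec : Claim_equal_block_pushing := by
  intro lst n _
  unfold Spec_block_pushing block_pushing block_pushing_alt
  exact pvGo_eq n.toNat lst
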